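/- GENERATED by farm/mkstatement.py from design/units.split.tsv — do not edit.
   THE SPLIT of the proof unit `start_decoder.R14` into `start_decoder.R14a`, `start_decoder.R14b`, `start_decoder.R14c`, `start_decoder.R14d`, `start_decoder.R14e`, `start_decoder.R14f`: the children's statements give the parent's
   UNCHANGED statement (so nothing above the parent — callers, compositions — is touched by the split). -/
import Vorbis.Spec.StartDecoderR14
import Vorbis.Spec.Units.start_decoder_R14
import Vorbis.Spec.Units.start_decoder_R14a
import Vorbis.Spec.Units.start_decoder_R14b
import Vorbis.Spec.Units.start_decoder_R14c
import Vorbis.Spec.Units.start_decoder_R14d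
import Vorbis.Spec.Units.start_decoder_R14e
import Vorbis.Spec.Units.start_decoder_R14f
namespace Vorbis.Spec.Splits
open X86 X86.User Asan

/-- The children of the split unit `start_decoder.R14` prove it, by `Vorbis.Spec.StartDecoder.SegR14.of_parts`. -/
theorem start_decoder_R14
    (h_start_decoder_R14a : Vorbis.Spec.start_decoder_R14a.Statement)
    (h_start_decoder_R14b : Vorbis.Spec.start_decoder_R14b.Statement)
    (h_start_decoder_R14c : Vorbis.Spec.start_decoder_R14c.Statement)
    (h_start_decoder_R14d : Vorbis.Spec.start_decoder_R14d.Statement)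
    (h_start_decoder_R14e : Vorbis.Spec.start_decoder_R14e.Statement)
    (h_start_decoder_R14f : Vorbis.Spec.start_decoder_R14f.Statement) :
    Vorbis.Spec.start_decoder_R14.Statement := by
  intro Lay _hLay μ _hμ u₀ _hcode _h_get_bits _h_asan_store1_noabort _h_asan_store2_noabort _h_asan_load2_noabort _h_error _h_asan_load4_noabort
  apply Vorbis.Spec.StartDecoder.SegR14.of_parts
  · exact h_start_decoder_R14a Lay _hLay μ _hμ u₀ _hcode _h_get_bits
  · exact h_start_decoder_R14b Lay _hLay μ _hμ u₀ _hcode _h_get_bits _h_asan_store1_noabort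
  · exact h_start_decoder_R14c Lay _hLay μ _hμ u₀ _hcode _h_get_bits _h_asan_store2_noabort
  · exact h_start_decoder_R14d Lay _hLay μ _hμ u₀ _hcode _h_get_bits _h_asan_store2_noabort
  · exact h_start_decoder_R14e Lay _hLay μ _hμ u₀ _hcode _h_asan_store1_noabort _h_asan_load2_noabort _h_asan_load4_noabort
  · exact h_start_decoder_R14f Lay _hLay μ _hμ u₀ _hcode _h_error

end Vorbis.Spec.Splits
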